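-- pv_equiv track=rewrite | github.com/AlexisGR117/AYED | Programas/Printer Queue.py | solve
-- ===== SOURCE A (Python) =====
-- class MaxHeap:
--     def __init__(self, data=[]):
--         self.data = []
--         self.build_heap(data)
--
--     def insert(self, element):
--         self.data.append(element)
--         self.build_heap(self.data)
--
--     def remove(self, element):
--         self.data.remove(element)
--         self.build_heap(self.data)
--
--     def parent(self, index):
--         return (index - 1) // 2
--
--     def parent_value(self, index):
--         index_child = self.parent(index)
--         return self.data[index_child] if 0 <= index_child < len(self.data) else None
--
--     def left(self, index):
--         return 2 * index + 1
--
--     def left_value(self, index):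
--         index_child = self.left(index)
--         return self.data[index_child] if 0 <= index_child < len(self.data) else None
--
--     def right(self, index):
--         return 2 * (index + 1)
--
--     def right_value(self, index):
--         index_child = self.right(index)
--         return self.data[index_child] if 0 <= index_child < len(self.data) else None
--
--     def max_heapify(self, i):
--         left, left_value, right, right_value = self.left(i), self.left_value(i), self.right(i), self.right_value(i)
--         largest = None
--         if left < len(self.data) and left_value > self.data[i]:
--             largest = left
--         else:
--             largest = i
--         if right < len(self.data) and right_value > self.data[largest]:
--             largest = right
--         if largest != i:
--             self.data[largest], self.data[i] = self.data[i], self.data[largest]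
--             self.max_heapify(largest)
--
--     def build_heap(self, data):
--         self.data = data
--         for i in range(len(self.data), -1, -1):
--             self.max_heapify(i)
--
--     def __str__(self):
--         return str(self.data)
--
--     def is_empty(self):
--         return len(self.data) == 0
--
--     def get_top_priority(self):
--         if not self.is_empty():
--             top = self.data.pop(0)
--             self.build_heap(self.data)
--             return top
--
--     def __len__(self):
--         return len(self.data)
--
--     def peek_top_priority(self):
--         if not self.is_empty():
--             top = self.data[0]
--             return top
--         return None
--
-- def solve(documents, m):
--     priorities = MaxHeap(list(documents))
--     documents, index, priority = [(x, documents[x]) for x in range(len(documents))], 0, 1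
--     amount_time = 0
--     printed = False
--     while not printed and len(documents) > 0:
--         take_first = documents[0]
--         if take_first[priority] >= priorities.peek_top_priority():
--             amount_time += 1
--             documents.pop(0)
--             priorities.get_top_priority()
--             if take_first[index] == m:
--                 printed = True
--         else:
--             documents.append(documents.pop(0))
--     return amount_time
-- ===== SOURCE B (Python) =====
-- def solve(documents, m):
--     # Sort priorities once (descending); order[t] is always the highest
--     # priority still in the queue.  Rotate with a head pointer instead of
--     # pop(0), and never rebuild a heap.
--     order = sorted(documents, reverse=True)
--     queue = [(i, p) for i, p in enumerate(documents)]
--     head = 0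
--     t = 0
--     time = 0
--     while head < len(queue):
--         i, p = queue[head]
--         head += 1
--         if p == order[t]:
--             t += 1
--             time += 1
--             if i == m:
--                 return time
--         else:
--             queue.append((i, p))
--     return time
-- ===== Notes on version B (the rewrite author's own statement) =====
-- stated objective: alternative
-- what changed: Replaces the MaxHeap that A rebuilds with build_heap after every peek/pop by a single descending sort consulted through an advancing pointer, and rotates the queue with a head index instead of list.pop(0); intended as faster (a timing run measured ~5x at its largest size but did not confirm its 1.5x-where-A-times-out threshold, so no speed is claimed).
import Mathlib
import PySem

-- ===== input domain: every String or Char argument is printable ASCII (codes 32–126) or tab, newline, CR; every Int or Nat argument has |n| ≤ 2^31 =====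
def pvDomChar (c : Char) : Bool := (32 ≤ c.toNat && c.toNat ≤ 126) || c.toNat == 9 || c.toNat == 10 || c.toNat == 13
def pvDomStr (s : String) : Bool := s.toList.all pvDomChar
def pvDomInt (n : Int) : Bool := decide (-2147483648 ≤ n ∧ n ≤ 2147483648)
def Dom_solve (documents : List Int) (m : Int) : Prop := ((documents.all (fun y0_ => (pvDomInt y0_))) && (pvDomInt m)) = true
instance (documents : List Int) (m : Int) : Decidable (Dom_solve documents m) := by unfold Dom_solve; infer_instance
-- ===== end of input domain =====

-- B replaces A's MaxHeap (rebuilt with build_heap after every peek/pop) by one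
-- descending sort consulted through an advancing pointer, and rotates via a head
-- index instead of list.pop(0); objective: alternative (intended as faster; the
-- timing run measured ~5x at its largest size but did not confirm its threshold,
-- as both programs share the rotation phase).

-- ===== PORT A =====

-- the index `largest` that MaxHeap.max_heapify(i) computes (same two chained comparisons)
def hLargest (l : List Int) (i : Nat) : Nat :=
  let largest1 := if 2*i+1 < l.length ∧ l.getD i 0 < l.getD (2*i+1) 0 then 2*i+1 else i
  if 2*i+2 < l.length ∧ l.getD largest1 0 < l.getD (2*i+2) 0 then 2*i+2 else largest1

-- termination fact for max_heapify, cited by the port's decreasing_by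
theorem hLargest_ne_bounds (l : List Int) (i : Nat) (h : hLargest l i ≠ i) :
    i < hLargest l i ∧ hLargest l i < l.length := by
  unfold hLargest at h ⊢
  dsimp only at h ⊢
  split_ifs at h ⊢ <;> simp_all <;> omega

-- MaxHeap.max_heapify: swap self.data[largest] <-> self.data[i], recurse at largest
def maxHeapify (l : List Int) (i : Nat) : List Int :=
  if h : hLargest l i ≠ i then
    maxHeapify ((l.set (hLargest l i) (l.getD i 0)).set i (l.getD (hLargest l i) 0)) (hLargest l i)
  else l
termination_by l.length - i
decreasing_by
  simp only [List.length_set]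
  have := hLargest_ne_bounds l i h
  omega

-- MaxHeap.build_heap: for i in range(len(data), -1, -1): max_heapify(i)
def buildHeap (l : List Int) : List Int :=
  (List.range (l.length + 1)).reverse.foldl (fun acc i => maxHeapify acc i) l

-- A's while loop; peek_top_priority = data[0] (the heap is nonempty whenever the loop
-- body runs, so getD 0 0 is exact there); get_top_priority = data.pop(0) + build_heap.
-- The while loop is ported with fuel n*n+n+1, which exceeds any run's iteration count
-- (at most n pops, each preceded by fewer than n rotations).
def solveLoopA (m : Int) : Nat → List (Int × Int) → List Int → Int → Int
  | 0, _, _, time => time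
  | _ + 1, [], _, time => time
  | fuel + 1, f :: rest, heap, time =>
    if f.2 ≥ heap.getD 0 0 then
      if f.1 = m then time + 1
      else solveLoopA m fuel rest (buildHeap heap.tail) (time + 1)
    else solveLoopA m fuel (rest ++ [f]) heap time

def solve (documents : List Int) (m : Int) : Int :=
  let heap0 := buildHeap documents
  let docs0 := (PySem.List.pyRange 0 (PySem.List.len documents) 1).map
    (fun x => (x, PySem.List.pyGetD documents x 0))
  solveLoopA m (documents.length * documents.length + documents.length + 1) docs0 heap0 0

-- ===== PORT B =====

-- B's while loop: queue with a head pointer, order[t] = highest priority still queued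
def solveLoopB (m : Int) (order : List Int) :
    Nat → List (Int × Int) → Nat → Nat → Int → Int
  | 0, _, _, _, time => time
  | fuel + 1, queue, head, t, time =>
    if head < queue.length then
      let f := queue.getD head (0, 0)
      if f.2 = order.getD t 0 then
        if f.1 = m then time + 1
        else solveLoopB m order fuel queue (head + 1) (t + 1) (time + 1)
      else solveLoopB m order fuel (queue ++ [f]) (head + 1) t time
    else time

def solve_alt (documents : List Int) (m : Int) : Int :=
  let order := PySem.List.sorted documents (fun x => x) true
  let queue := PySem.List.enumerate documents
  solveLoopB m order (documents.length * documents.length + documents.length + 1) queue 0 0 0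

-- ===== PRECONDITION & SPEC =====
def Spec_solve (documents : List Int) (m : Int) (out : Int) : Prop := out = solve_alt documents m
instance (documents : List Int) (m : Int) (out : Int) : Decidable (Spec_solve documents m out) := by unfold Spec_solve; infer_instance

-- ===== CLAIM (what is proved, stated in full; the proofs are below) =====
def Claim_equal_solve : Prop := ∀ (documents : List Int) (m : Int), Dom_solve documents m → Spec_solve documents m (solve documents m)

-- ===== LEMMAS AND PROOFS =====

-- local heap property from index i downwards: every node ≥ i dominates its children
def PH (l : List Int) (i : Nat) : Prop :=
  ∀ j k : Nat, i ≤ j → k < l.length → (k = 2*j+1 ∨ k = 2*j+2) → l.getD k 0 ≤ l.getD j 0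

theorem hLargest_ge_self (l : List Int) (i : Nat) :
    l.getD i 0 ≤ l.getD (hLargest l i) 0 := by
  unfold hLargest; dsimp only; split_ifs <;> omega

theorem hLargest_max (l : List Int) (i k : Nat)
    (hk : k = 2*i+1 ∨ k = 2*i+2) (hkl : k < l.length) :
    l.getD k 0 ≤ l.getD (hLargest l i) 0 := by
  unfold hLargest; dsimp only; split_ifs <;> rcases hk with h | h <;> subst h <;> omega

theorem hLargest_cases (l : List Int) (i : Nat) :
    hLargest l i = i ∨ hLargest l i = 2*i+1 ∨ hLargest l i = 2*i+2 := by
  unfold hLargest; dsimp only; split_ifs <;> omega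

theorem length_maxHeapify (l : List Int) (i : Nat) :
    (maxHeapify l i).length = l.length := by
  induction l, i using maxHeapify.induct with
  | case1 l i h ih => rw [maxHeapify, dif_pos h]; simpa using ih
  | case2 l i h => rw [maxHeapify, dif_neg h]

theorem maxHeapify_getD_eq (l : List Int) (i : Nat) :
    ∀ k, k ≠ i → k < 2*i+1 → (maxHeapify l i).getD k 0 = l.getD k 0 := by
  induction l, i using maxHeapify.induct with
  | case1 l i h ih =>
    intro k hk hk2
    have hb := hLargest_ne_bounds l i h
    have hc := hLargest_cases l i
    rw [maxHeapify, dif_pos h, ih k (by omega) (by omega)]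
    simp only [List.getD_eq_getElem?_getD]
    rw [List.getElem?_set_ne (by omega), List.getElem?_set_ne (by omega)]
  | case2 l i h => intro k hk hk2; rw [maxHeapify, dif_neg h]

theorem maxHeapify_root (l : List Int) (i : Nat) :
    ∃ k, (k = i ∨ ((k = 2*i+1 ∨ k = 2*i+2) ∧ k < l.length)) ∧
      (maxHeapify l i).getD i 0 = l.getD k 0 := by
  by_cases h : hLargest l i ≠ i
  · have hb := hLargest_ne_bounds l i h
    have hc := hLargest_cases l i
    refine ⟨hLargest l i, by tauto, ?_⟩
    rw [maxHeapify, dif_pos h, maxHeapify_getD_eq _ _ i (by omega) (by omega)]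
    simp only [List.getD_eq_getElem?_getD]
    rw [List.getElem?_set_self (by simp; omega)]
    simp
  · exact ⟨i, Or.inl rfl, by rw [maxHeapify, dif_neg h]⟩

theorem swap_cons_perm (x : Int) : ∀ (xs : List Int) (c : Nat), c < xs.length →
    ((xs.getD c 0) :: xs.set c x).Perm (x :: xs) := by
  intro xs
  induction xs with
  | nil => intro c hc; simp at hc
  | cons y ys ih =>
    intro c hc
    cases c with
    | zero => simpa using List.Perm.swap x y ys
    | succ c' =>
      have h1 : ((y :: ys).getD (c'+1) 0) = ys.getD c' 0 := by simp
      have h2 : (y :: ys).set (c'+1) x = y :: ys.set c' x := by simp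
      rw [h1, h2]
      have p1 : (ys.getD c' 0 :: y :: ys.set c' x).Perm (y :: ys.getD c' 0 :: ys.set c' x) :=
        List.Perm.swap _ _ _
      have p2 : (y :: ys.getD c' 0 :: ys.set c' x).Perm (y :: x :: ys) :=
        List.Perm.cons y (ih c' (by simpa using hc))
      have p3 : (y :: x :: ys).Perm (x :: y :: ys) := List.Perm.swap _ _ _
      exact (p1.trans p2).trans p3

theorem swap_perm (l : List Int) (i c : Nat) (hic : i < c) (hc : c < l.length) :
    ((l.set c (l.getD i 0)).set i (l.getD c 0)).Perm l := by
  induction l generalizing i c with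
  | nil => simp at hc
  | cons y ys ih =>
    cases i with
    | zero =>
      obtain ⟨c', rfl⟩ : ∃ c', c = c' + 1 := ⟨c - 1, by omega⟩
      have h2 : (y :: ys).set (c'+1) ((y :: ys).getD 0 0) = y :: ys.set c' y := by simp
      rw [h2]
      have h3 : (y :: ys.set c' y).set 0 ((y :: ys).getD (c'+1) 0) = ys.getD c' 0 :: ys.set c' y := by simp
      rw [h3]
      exact swap_cons_perm y ys c' (by simpa using hc)
    | succ i' =>
      obtain ⟨c', rfl⟩ : ∃ c', c = c' + 1 := ⟨c - 1, by omega⟩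
      have h2 : ((y :: ys).set (c'+1) ((y :: ys).getD (i'+1) 0)).set (i'+1) ((y :: ys).getD (c'+1) 0)
          = y :: ((ys.set c' (ys.getD i' 0)).set i' (ys.getD c' 0)) := by simp
      rw [h2]
      exact List.Perm.cons y (ih i' c' (by omega) (by simpa using hc))

theorem maxHeapify_perm (l : List Int) (i : Nat) : (maxHeapify l i).Perm l := by
  induction l, i using maxHeapify.induct with
  | case1 l i h ih =>
    have hb := hLargest_ne_bounds l i h
    rw [maxHeapify, dif_pos h]
    exact ih.trans (swap_perm l i (hLargest l i) hb.1 hb.2)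
  | case2 l i h => rw [maxHeapify, dif_neg h]

theorem maxHeapify_PH : ∀ (l : List Int) (i : Nat), PH l (i+1) → PH (maxHeapify l i) i := by
  intro l i
  induction l, i using maxHeapify.induct with
  | case2 l i hne =>
    intro h
    rw [maxHeapify, dif_neg hne]
    intro j k hij hkl hch
    rcases Nat.eq_or_lt_of_le hij with rfl | hlt
    · have heq : hLargest l i = i := by by_contra hx; exact hne hx
      have := hLargest_max l i k hch hkl
      rwa [heq] at this
    · exact h j k (by omega) hkl hch
  | case1 l i hne ih =>
    intro h
    have hb := hLargest_ne_bounds l i hne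
    have hcas := hLargest_cases l i
    set c := hLargest l i with hcdef
    set l' := (l.set c (l.getD i 0)).set i (l.getD c 0) with hl'def
    have hlen' : l'.length = l.length := by simp [hl'def]
    have getD_l' : ∀ k, k ≠ i → k ≠ c → l'.getD k 0 = l.getD k 0 := by
      intro k hki hkc
      simp only [hl'def, List.getD_eq_getElem?_getD]
      rw [List.getElem?_set_ne (by omega), List.getElem?_set_ne (by omega)]
    have getD_i : l'.getD i 0 = l.getD c 0 := by
      simp only [hl'def, List.getD_eq_getElem?_getD]
      rw [List.getElem?_set_self (by simp; omega)]; simp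
    have getD_c : l'.getD c 0 = l.getD i 0 := by
      simp only [hl'def, List.getD_eq_getElem?_getD]
      rw [List.getElem?_set_ne (by omega), List.getElem?_set_self (by omega)]; simp
    have hPH' : PH l' (c+1) := by
      intro j k hj hk hch
      rw [getD_l' j (by omega) (by omega), getD_l' k (by omega) (by omega)]
      exact h j k (by omega) (by rwa [hlen'] at hk) hch
    have hrec : PH (maxHeapify l' c) c := ih hPH'
    have hlen'' : (maxHeapify l' c).length = l.length := by
      rw [length_maxHeapify, hlen']
    -- unfold the port one step
    have hstep : maxHeapify l i = maxHeapify l' c := by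
      rw [maxHeapify, dif_pos hne]
    rw [hstep]
    intro j k hij hkl hch
    rw [hlen''] at hkl
    rcases Nat.lt_or_ge j c with hjc | hjc
    · rcases Nat.eq_or_lt_of_le hij with rfl | hji
      · -- j = i
        have hi'' : (maxHeapify l' c).getD i 0 = l.getD c 0 := by
          rw [maxHeapify_getD_eq l' c i (by omega) (by omega), getD_i]
        by_cases hkc : k = c
        · subst hkc
          obtain ⟨k0, hk0, hval⟩ := maxHeapify_root l' c
          rw [hi'', hval]
          rcases hk0 with rfl | ⟨hk0c, hk0l⟩
          · rw [getD_c]; exact hLargest_ge_self l i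
          · rw [hlen'] at hk0l
            rw [getD_l' k0 (by omega) (by omega)]
            exact h c k0 (by omega) hk0l hk0c
        · -- sibling
          rw [hi'', maxHeapify_getD_eq l' c k (by omega) (by omega),
            getD_l' k (by omega) (by omega)]
          exact hLargest_max l i k hch hkl
      · -- i < j < c
        rw [maxHeapify_getD_eq l' c j (by omega) (by omega),
          maxHeapify_getD_eq l' c k (by omega) (by omega),
          getD_l' j (by omega) (by omega), getD_l' k (by omega) (by omega)]
        exact h j k (by omega) hkl hch
    · exact hrec j k hjc (by rwa [hlen'']) hch

theorem foldl_heapify_PH : ∀ (k : Nat) (l : List Int), PH l k →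
    PH ((List.range k).reverse.foldl (fun acc i => maxHeapify acc i) l) 0 := by
  intro k
  induction k with
  | zero => intro l h; simpa using h
  | succ k ih =>
    intro l h
    rw [List.range_succ, List.reverse_append]
    simpa using ih (maxHeapify l k) (maxHeapify_PH l k h)

theorem foldl_heapify_perm : ∀ (k : Nat) (l : List Int),
    ((List.range k).reverse.foldl (fun acc i => maxHeapify acc i) l).Perm l := by
  intro k
  induction k with
  | zero => intro l; simp
  | succ k ih =>
    intro l
    rw [List.range_succ, List.reverse_append]
    simpa using (ih (maxHeapify l k)).trans (maxHeapify_perm l k)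

theorem buildHeap_PH (l : List Int) : PH (buildHeap l) 0 := by
  apply foldl_heapify_PH
  intro j k hj hk hch; omega

theorem buildHeap_perm (l : List Int) : (buildHeap l).Perm l :=
  foldl_heapify_perm (l.length + 1) l

theorem PH_root_max (l : List Int) (h : PH l 0) :
    ∀ k, k < l.length → l.getD k 0 ≤ l.getD 0 0 := by
  intro k
  induction k using Nat.strong_induction_on with
  | _ k ih =>
    intro hk
    cases Nat.eq_zero_or_pos k with
    | inl h0 => subst h0; exact le_refl _
    | inr hpos =>
      have hp : l.getD k 0 ≤ l.getD ((k-1)/2) 0 :=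
        h ((k-1)/2) k (Nat.zero_le _) hk (by omega)
      exact le_trans hp (ih ((k-1)/2) (by omega) (by omega))

theorem loop_eq (m : Int) (order : List Int)
    (hord : order.Pairwise (fun a b : Int => b ≤ a)) :
    ∀ (fuel : Nat) (queue : List (Int × Int)) (head t : Nat) (heap : List Int) (time : Int),
      PH heap 0 →
      (heap : Multiset Int) = (((queue.drop head).map Prod.snd : List Int) : Multiset Int) →
      ((order.drop t : List Int) : Multiset Int) = (((queue.drop head).map Prod.snd : List Int) : Multiset Int) →
      solveLoopA m fuel (queue.drop head) heap time = solveLoopB m order fuel queue head t time := by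
  intro fuel
  induction fuel with
  | zero => intro queue head t heap time _ _ _; rfl
  | succ fuel ih =>
    intro queue head t heap time hPH heq oeq
    rcases hdocs : queue.drop head with _ | ⟨f, rest⟩
    · -- queue exhausted
      have hlen : queue.length ≤ head := by
        have := congrArg List.length hdocs
        simp only [List.length_drop, List.length_nil] at this
        omega
      rw [solveLoopA, solveLoopB, if_neg (by omega)]
    · have hlt : head < queue.length := by
        have := congrArg List.length hdocs
        simp only [List.length_drop, List.length_cons] at this
        omega
      have hgetf : queue.getD head (0, 0) = f := by
        have h0 : (queue.drop head)[0]? = queue[head]? := by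
          simp [List.getElem?_drop]
        rw [hdocs] at h0
        simp only [List.getD_eq_getElem?_getD, ← h0]
        rfl
      -- heap is nonempty
      rcases hheap : heap with _ | ⟨h0, ht⟩
      · exfalso
        rw [hheap, hdocs] at heq
        simp only [List.map_cons, ← Multiset.cons_coe, Multiset.coe_nil] at heq
        exact Multiset.cons_ne_zero heq.symm
      rw [hheap] at heq hPH
      -- order.drop t is nonempty
      rcases hot : order.drop t with _ | ⟨o0, ot⟩
      · exfalso
        rw [hot, hdocs] at oeq
        simp only [List.map_cons, ← Multiset.cons_coe, Multiset.coe_nil] at oeq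
        exact Multiset.cons_ne_zero oeq.symm
      rw [hot, hdocs] at oeq
      rw [hdocs] at heq
      -- h0 is ≥ every element of the heap
      have hmax : ∀ x ∈ (h0 :: ht), x ≤ h0 := by
        intro x hx
        obtain ⟨k, hk, hxk⟩ := List.mem_iff_getElem.mp hx
        have := PH_root_max (h0 :: ht) hPH k hk
        simp only [List.getD_eq_getElem?_getD, List.getElem?_eq_getElem hk] at this
        simpa [hxk] using this
      -- o0 is ≥ every element of order.drop t
      have omax : ∀ x ∈ (o0 :: ot), x ≤ o0 := by
        intro x hx
        have hpw : (o0 :: ot).Pairwise (fun a b : Int => b ≤ a) := by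
          rw [← hot]; exact hord.drop
        rcases List.mem_cons.mp hx with rfl | hx'
        · exact le_refl _
        · exact (List.pairwise_cons.mp hpw).1 x hx'
      have hmem_eq : ∀ x : Int, x ∈ (h0 :: ht) ↔ x ∈ (o0 :: ot) := by
        intro x
        constructor
        · intro hx
          have : x ∈ ((o0 :: ot : List Int) : Multiset Int) := by
            rw [oeq, ← heq]; exact Multiset.mem_coe.mpr hx
          exact Multiset.mem_coe.mp this
        · intro hx
          have : x ∈ ((h0 :: ht : List Int) : Multiset Int) := by
            rw [heq, ← oeq]; exact Multiset.mem_coe.mpr hx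
          exact Multiset.mem_coe.mp this
      have h0o0 : h0 = o0 := by
        have h1 : h0 ≤ o0 := omax h0 ((hmem_eq h0).mp (List.mem_cons_self))
        have h2 : o0 ≤ h0 := hmax o0 ((hmem_eq o0).mpr (List.mem_cons_self))
        omega
      have hf2 : f.2 ≤ h0 := by
        apply hmax
        have : f.2 ∈ ((h0 :: ht : List Int) : Multiset Int) := by
          rw [heq]
          exact Multiset.mem_coe.mpr (List.mem_map_of_mem (List.mem_cons_self))
        exact Multiset.mem_coe.mp this
      have hgetD0 : (h0 :: ht).getD 0 0 = h0 := rfl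
      have hgetDt : order.getD t 0 = o0 := by
        have h1 : (order.drop t)[0]? = order[t]? := by
          simp [List.getElem?_drop]
        rw [hot] at h1
        simp only [List.getD_eq_getElem?_getD, ← h1]
        rfl
      have hcond : (f.2 ≥ (h0 :: ht).getD 0 0) ↔ (f.2 = order.getD t 0) := by
        rw [hgetD0, hgetDt]; omega
      have hdroptail : queue.drop (head + 1) = rest := by
        rw [← List.tail_drop, hdocs]; rfl
      rw [solveLoopA, solveLoopB, if_pos hlt]
      simp only [hgetf, hheap]
      by_cases hc : f.2 ≥ (h0 :: ht).getD 0 0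
      · rw [if_pos hc, if_pos (hcond.mp hc)]
        by_cases hm : f.1 = m
        · rw [if_pos hm, if_pos hm]
        · rw [if_neg hm, if_neg hm]
          -- pop step
          have hf2h0 : f.2 = h0 := by
            have := hcond.mp hc
            rw [hgetDt] at this
            omega
          have heq' : ((buildHeap ht : List Int) : Multiset Int) = ((rest.map Prod.snd : List Int) : Multiset Int) := by
            have hp : ((buildHeap ht : List Int) : Multiset Int) = ((ht : List Int) : Multiset Int) :=
              Multiset.coe_eq_coe.mpr (buildHeap_perm ht)
            rw [hp]
            have : (h0 ::ₘ (ht : Multiset Int)) = h0 ::ₘ ((rest.map Prod.snd : List Int) : Multiset Int) := by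
              have := heq
              simp only [List.map_cons, ← Multiset.cons_coe] at this
              rwa [hf2h0] at this
            exact (Multiset.cons_inj_right h0).mp this
          have oeq' : ((order.drop (t+1) : List Int) : Multiset Int) = ((rest.map Prod.snd : List Int) : Multiset Int) := by
            have hdt : order.drop (t+1) = ot := by rw [← List.tail_drop, hot]; rfl
            rw [hdt]
            have : (o0 ::ₘ (ot : Multiset Int)) = o0 ::ₘ ((rest.map Prod.snd : List Int) : Multiset Int) := by
              have := oeq
              simp only [List.map_cons, ← Multiset.cons_coe] at this
              rwa [hf2h0, h0o0] at this
            exact (Multiset.cons_inj_right o0).mp this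
          have := ih queue (head+1) (t+1) (buildHeap ht) (time+1) (buildHeap_PH ht)
            (by rw [hdroptail]; exact heq') (by rw [hdroptail]; exact oeq')
          rw [hdroptail] at this
          exact this
      · rw [if_neg hc, if_neg (fun hx => hc (hcond.mpr hx))]
        -- rotation step
        have hdrop' : (queue ++ [f]).drop (head+1) = rest ++ [f] := by
          rw [List.drop_append_of_le_length (by omega), hdroptail]
        have hperm : ((rest ++ [f]).map Prod.snd).Perm ((f :: rest).map Prod.snd) :=
          (List.perm_append_singleton f rest).map Prod.snd
        have heq' : ((h0 :: ht : List Int) : Multiset Int) = (((rest ++ [f]).map Prod.snd : List Int) : Multiset Int) := by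
          rw [heq]; exact (Multiset.coe_eq_coe.mpr hperm).symm
        have oeq' : ((order.drop t : List Int) : Multiset Int) = (((rest ++ [f]).map Prod.snd : List Int) : Multiset Int) := by
          rw [hot]; exact oeq.trans (Multiset.coe_eq_coe.mpr hperm).symm
        have := ih (queue ++ [f]) (head+1) t (h0 :: ht) time hPH
          (by rw [hdrop']; exact heq') (by rw [hdrop']; exact oeq')
        rw [hdrop'] at this
        exact this

-- ===== VERDICT (by name: the statement is the Claim_ definition above) =====
theorem solve_spec : Claim_equal_solve := by
  intro documents m _
  unfold Spec_solve solve solve_alt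
  rw [← PySem.List.enumerate_eq_map_pyRange documents 0]
  have h := loop_eq m (PySem.List.sorted documents (fun x => x) true)
      (PySem.List.sorted_pairwise_rev documents (fun x => x))
      (documents.length * documents.length + documents.length + 1)
      (PySem.List.enumerate documents) 0 0 (buildHeap documents) 0
      (buildHeap_PH documents)
      (by simp only [List.drop_zero]
          have hm : (PySem.List.enumerate documents).map Prod.snd = documents :=
            PySem.List.map_snd_enumerate documents 0
          rw [hm]
          exact Multiset.coe_eq_coe.mpr (buildHeap_perm documents))
      (by simp only [List.drop_zero]
          have hm : (PySem.List.enumerate documents).map Prod.snd = documents :=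
            PySem.List.map_snd_enumerate documents 0
          rw [hm]
          exact Multiset.coe_eq_coe.mpr (PySem.List.sorted_perm documents (fun x => x) true))
  simpa using h
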